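-- pv_equiv track=rewrite | github.com/zhenfelix/OnlineJudgeCodings | 塔子哥学算法/米哈游 2023.03.19-第三题-塔子哥的无限字符串TLE.py | calc
-- ===== SOURCE A (Python) =====
-- from functools import lru_cache
--
-- def calc(m):
--     s = list(map(int,list(str(m))))
--     n = len(s)
--     @lru_cache(None)
--     def dfs(i,zero,fhi):
--         if i == n:
--             return 0, 1
--         hi = s[i] if fhi else 9
--         sums, cnt = 0, 0
--         candidates = [(0,1)] if hi == 0 else [(0,1),(-1,hi-1),(hi,1)]
--         for ch, mutiples in candidates:
--             sums_, cnt_ = dfs(i+1,zero and ch ==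
--     0, fhi and
--     ch == hi)
--             sums += sums_*mutiples
--             cnt += cnt_ *mutiples
--             if zero and ch == 0: continue
--             sums += cnt_ *mutiples
--         return sums, cnt
--     # dfs.cache_clear()
--     return dfs(0,1,1)[0]
-- ===== SOURCE B (Python) =====
-- def calc(m):
--     # closed form: total number of significant digits over 1..m
--     n = len(str(m))
--     total = 0
--     for d in range(1, n):
--         total += d * 9 * 10 ** (d - 1)
--     return total + n * (m - 10 ** (n - 1) + 1)
-- ===== Notes on version B (the rewrite author's own statement) =====
-- stated objective: simpler
-- what changed: Replaces the memoized digit-DP recursion over (position, leading-zero, tight) states by a closed-form sum over digit lengths (count of numbers of each length times the length) plus one term for the numbers with as many digits as m, using n = len(str(m)).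
import Mathlib
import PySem

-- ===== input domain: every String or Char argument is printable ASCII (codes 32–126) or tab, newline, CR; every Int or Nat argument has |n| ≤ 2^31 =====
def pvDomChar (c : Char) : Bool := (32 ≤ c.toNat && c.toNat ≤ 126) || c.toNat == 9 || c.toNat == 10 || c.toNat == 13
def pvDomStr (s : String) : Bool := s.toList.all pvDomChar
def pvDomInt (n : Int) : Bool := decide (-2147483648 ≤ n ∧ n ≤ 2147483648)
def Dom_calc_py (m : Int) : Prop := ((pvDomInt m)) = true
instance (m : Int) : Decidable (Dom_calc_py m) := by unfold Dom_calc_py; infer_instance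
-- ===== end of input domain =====

-- B replaces A's memoized digit-DP recursion by the closed-form sum over digit lengths (simpler).

-- ===== PORT A =====
-- int(ch) for a one-character string ch (total form; Pre_ excludes the '-' of a negative m, where Python raises ValueError)
def pvChInt (c : Char) : Int := (PySem.Int.ofChars? [c]).getD 0

-- s = list(map(int, list(str(m))))
def pvDigitsA (m : Int) : List Int := (PySem.Int.toStr m).toList.map pvChInt

-- dfs(i, zero, fhi), written as structural recursion on the suffix s[i:] (lru_cache dropped: pure speed)
def pvDfsA : List Int → Bool → Bool → Int × Int
  | [], _, _ => (0, 1)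
  | d :: r, zero, fhi =>
    let hi : Int := if fhi then d else 9
    let candidates : List (Int × Int) :=
      if hi = 0 then [(0, 1)] else [(0, 1), (-1, hi - 1), (hi, 1)]
    candidates.foldl
      (fun acc c =>
        let res := pvDfsA r (zero && (c.1 == 0)) (fhi && (c.1 == hi))
        let sums := acc.1 + res.1 * c.2
        let cnt := acc.2 + res.2 * c.2
        if zero && (c.1 == 0) then (sums, cnt) else (sums + res.2 * c.2, cnt))
      (0, 0)

def calc_py (m : Int) : Int :=
  let s := pvDigitsA m
  (pvDfsA s true true).1

-- ===== PORT B =====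
def calc_py_alt (m : Int) : Int :=
  let n : Int := PySem.Str.len (PySem.Int.toStr m)
  let total : Int :=
    (PySem.List.pyRange 1 n 1).foldl (fun t d => t + d * 9 * 10 ^ (d - 1).toNat) 0
  total + n * (m - 10 ^ (n - 1).toNat + 1)

-- ===== PRECONDITION & SPEC =====
-- Pre_ excludes negative m, on which A raises ValueError (int('-') on the sign character of str(m)).
def Pre_calc_py (m : Int) : Prop := 0 ≤ m
instance (m : Int) : Decidable (Pre_calc_py m) := by unfold Pre_calc_py; infer_instance
def pvWitness_calc_py : Int := (10)

def Spec_calc_py (m : Int) (out : Int) : Prop := out = calc_py_alt m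
instance (m : Int) (out : Int) : Decidable (Spec_calc_py m out) := by unfold Spec_calc_py; infer_instance

-- ===== CLAIM (what is proved, stated in full; the proofs are below) =====
def Claim_equal_calc_py : Prop := ∀ (m : Int), Dom_calc_py m → Pre_calc_py m → Spec_calc_py m (calc_py m)

-- ===== LEMMAS AND PROOFS =====

-- decimal value of a digit list (most significant first)
def pvVal (s : List Int) : Int := s.foldl (fun a d => 10 * a + d) 0

-- T L = Σ_{d=1..L} d*9*10^(d-1) = total digit count of all numbers 1 .. 10^L - 1
def pvT : Nat → Int
  | 0 => 0
  | L + 1 => pvT L + (L + 1) * 9 * 10 ^ L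

-- closed form of dfs in the (zero := true, fhi := true) state
def pvG : List Int → Int
  | [] => 0
  | d :: r =>
    if d = 0 then pvG r
    else pvT r.length + (d - 1) * (r.length + 1) * 10 ^ r.length
         + (r.length + 1) * (pvVal r + 1)

lemma pvVal_foldl (s : List Int) (a : Int) :
    s.foldl (fun a d => 10 * a + d) a = a * 10 ^ s.length + pvVal s := by
  induction s generalizing a with
  | nil => simp [pvVal]
  | cons d r ih =>
    simp only [List.foldl_cons, pvVal, List.length_cons]
    rw [ih (10 * a + d), show (10 : Int) * 0 + d = d by ring, ih d]
    ring

lemma pvVal_cons (d : Int) (r : List Int) :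
    pvVal (d :: r) = d * 10 ^ r.length + pvVal r := by
  simpa [pvVal] using pvVal_foldl r d

-- the characterization of dfs in all four flag states
lemma pvDfsA_spec : ∀ (s : List Int), (∀ d ∈ s, 0 ≤ d) → ∀ (zero fhi : Bool),
    pvDfsA s zero fhi =
      ((if zero then (if fhi then pvG s else pvT s.length)
        else (s.length : Int) * (if fhi then pvVal s + 1 else 10 ^ s.length)),
       if fhi then pvVal s + 1 else (10 : Int) ^ s.length) := by
  intro s
  induction s with
  | nil =>
    intro _ zero fhi
    cases zero <;> cases fhi <;> simp [pvDfsA, pvG, pvT, pvVal]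
  | cons d r ih =>
    intro h zero fhi
    have hr : ∀ x ∈ r, 0 ≤ x := fun x hx => h x (List.mem_cons_of_mem _ hx)
    have ihr := ih hr
    have hd0 : 0 ≤ d := h d (List.mem_cons_self ..)
    cases fhi with
    | false =>
      cases zero <;>
        (simp [pvDfsA, ihr, Prod.ext_iff, pvT, pow_succ] <;>
            first
              | trivial
              | (constructor <;> (push_cast; first | ring | trivial))
              | (push_cast; ring))
    | true =>
      by_cases hd : d = 0
      · subst hd
        cases zero <;>
          (simp [pvDfsA, ihr, Prod.ext_iff, pvG, pvVal_cons] <;>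
            first
              | trivial
              | (constructor <;> (push_cast; first | ring | trivial))
              | (push_cast; ring))
      · have hm1 : d ≠ -1 := by omega
        cases zero <;>
          (simp [pvDfsA, ihr, Prod.ext_iff, pvG, pvVal_cons, hd, Ne.symm hd, hm1, Ne.symm hm1,
            pow_succ] <;>
            first
              | trivial
              | (constructor <;> (push_cast; first | ring | trivial))
              | (push_cast; ring))

-- Nat.toDigitsCore agrees with Nat.digits when the fuel suffices
lemma pvToDigitsCore_spec : ∀ (fuel n : Nat) (ds : List Char), 0 < n → n < 10 ^ fuel →
    Nat.toDigitsCore 10 fuel n ds = ((Nat.digits 10 n).map Nat.digitChar).reverse ++ ds := by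
  intro fuel
  induction fuel with
  | zero => intro n ds hn hlt; omega
  | succ f ih =>
    intro n ds hn hlt
    rw [Nat.toDigitsCore]
    by_cases h10 : n / 10 = 0
    · have hlt10 : n < 10 := by omega
      rw [if_pos h10, Nat.digits_def' (by norm_num : 1 < 10) hn, h10, Nat.digits_zero,
        Nat.mod_eq_of_lt hlt10]
      simp
    · rw [if_neg h10]
      have hdiv : n / 10 < 10 ^ f :=
        Nat.div_lt_of_lt_mul (by calc n < 10 ^ (f + 1) := hlt
          _ = 10 * 10 ^ f := by ring)
      rw [ih (n / 10) _ (by omega) hdiv, Nat.digits_def' (by norm_num : 1 < 10) hn]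
      simp

lemma pvToDigits_eq (n : Nat) (hn : 0 < n) :
    Nat.toDigits 10 n = ((Nat.digits 10 n).map Nat.digitChar).reverse := by
  have hfuel : n < 10 ^ (n + 1) :=
    calc n < 10 ^ n := Nat.lt_pow_self (by norm_num)
    _ ≤ 10 ^ (n + 1) := Nat.pow_le_pow_right (by norm_num) (by omega)
  rw [Nat.toDigits, pvToDigitsCore_spec (n + 1) n [] hn hfuel, List.append_nil]

lemma pvChInt_digitChar (d : Nat) (hd : d < 10) : pvChInt (Nat.digitChar d) = Int.ofNat d := by
  interval_cases d <;> decide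

lemma pvVal_rev_map (l : List Nat) :
    pvVal ((l.map (fun d => Int.ofNat d)).reverse) = Int.ofNat (Nat.ofDigits 10 l) := by
  induction l with
  | nil => simp [pvVal, Nat.ofDigits]
  | cons x l ih =>
    simp only [List.map_cons, List.reverse_cons, Nat.ofDigits_cons]
    unfold pvVal
    rw [List.foldl_append]
    simp only [List.foldl_cons, List.foldl_nil]
    rw [show (l.map (fun d => Int.ofNat d)).reverse.foldl (fun a d => 10 * a + d) 0
        = pvVal ((l.map (fun d => Int.ofNat d)).reverse) from rfl, ih]
    simp only [Int.ofNat_eq_natCast]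
    push_cast
    ring

-- the digit list A builds from str(m), for m > 0
lemma pvDigitsA_pos (m : Int) (hm : 0 < m) :
    pvDigitsA m = ((Nat.digits 10 m.toNat).map (fun d => Int.ofNat d)).reverse := by
  have hm0 : ¬ m < 0 := by omega
  unfold pvDigitsA
  rw [PySem.Int.toList_toStr, PySem.Int.toChars, if_neg hm0,
    pvToDigits_eq m.toNat (by omega)]
  rw [List.map_reverse, List.map_map]
  congr 1
  apply List.map_congr_left
  intro d hd
  simpa [Function.comp] using pvChInt_digitChar d (Nat.digits_lt_base (by norm_num) hd)

lemma pvT_fold (k : Nat) :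
    (PySem.List.pyRange 1 ((k : Int) + 1) 1).foldl (fun t d => t + d * 9 * 10 ^ (d - 1).toNat) 0
      = pvT k := by
  induction k with
  | zero => simp [PySem.List.pyRange_one_eq_nil, pvT]
  | succ j ih =>
    have h1 : (1 : Int) ≤ (j : Int) + 1 := by omega
    rw [show ((j + 1 : Nat) : Int) + 1 = ((j : Int) + 1) + 1 by push_cast; ring,
      PySem.List.pyRange_one_succ_right h1, List.foldl_append, ih]
    simp only [List.foldl_cons, List.foldl_nil, pvT]
    have h2 : ((j : Int) + 1 - 1).toNat = j := by omega
    rw [h2]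

lemma pvLen_toStr (m : Int) :
    PySem.Str.len (PySem.Int.toStr m) = ((pvDigitsA m).length : Int) := by
  rw [PySem.Str.len_eq]
  unfold pvDigitsA
  simp

theorem pv_main (m : Int) (hm : 0 ≤ m) : calc_py m = calc_py_alt m := by
  rcases eq_or_lt_of_le hm with h0 | hpos
  · rw [← h0]; decide
  · have hdig := pvDigitsA_pos m hpos
    have hlne : Nat.digits 10 m.toNat ≠ [] := by
      rw [Nat.digits_ne_nil_iff_ne_zero]; omega
    rcases (List.eq_nil_or_concat (Nat.digits 10 m.toNat)).resolve_left hlne with ⟨q, dl, hql⟩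
    have hdl0 : dl ≠ 0 := by
      have h1 : (Nat.digits 10 m.toNat).getLast? = some dl := by rw [hql]; simp
      have h2 := List.getLast?_eq_some_getLast (l := Nat.digits 10 m.toNat) hlne
      rw [h1, Option.some_inj] at h2
      have h3 := Nat.getLast_digit_ne_zero 10 (m := m.toNat) (by omega)
      rw [h2]
      exact h3
    have hs : pvDigitsA m = Int.ofNat dl :: ((q.map (fun d => Int.ofNat d)).reverse) := by
      rw [hdig, hql]
      simp
    have hrlen : ((q.map (fun d => Int.ofNat d)).reverse).length = q.length := by simp
    have hval : pvVal (pvDigitsA m) = m := by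
      rw [hdig, pvVal_rev_map, Nat.ofDigits_digits]
      simp
      omega
    have hnonneg : ∀ d ∈ pvDigitsA m, 0 ≤ d := by
      intro d hd
      rw [hdig] at hd
      simp only [List.mem_reverse, List.mem_map] at hd
      rcases hd with ⟨x, _, rfl⟩
      exact Int.natCast_nonneg x
    have hA : calc_py m = pvG (pvDigitsA m) := by
      simp only [calc_py]
      rw [pvDfsA_spec (pvDigitsA m) hnonneg true true]
      simp
    have hn : PySem.Str.len (PySem.Int.toStr m) = ((q.length : Int) + 1) := by
      rw [pvLen_toStr m, hs]
      simp
    have hB : calc_py_alt m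
        = pvT q.length + ((q.length : Int) + 1) * (m - 10 ^ q.length + 1) := by
      simp only [calc_py_alt]
      rw [hn, pvT_fold q.length]
      have h2 : ((q.length : Int) + 1 - 1).toNat = q.length := by omega
      rw [h2]
    have hvc : Int.ofNat dl * 10 ^ q.length + pvVal ((q.map (fun d => Int.ofNat d)).reverse) = m := by
      rw [← hval, hs, pvVal_cons, hrlen]
    rw [hA, hB, hs]
    unfold pvG
    rw [if_neg (by simpa using hdl0), hrlen]
    push_cast at hvc ⊢
    nlinarith [hvc]

-- ===== VERDICT (by name: the statement is the Claim_ definition above) =====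
theorem calc_py_spec : Claim_equal_calc_py := by
  intro m _ hpre
  unfold Spec_calc_py
  exact pv_main m hpre
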